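-- pv_equiv track=rewrite | github.com/alexandrainst/wiki_expanded | src/wiki_expanded/processor.py | _add_newlines_to_headers
-- ===== SOURCE A (Python) =====
-- def _add_newlines_to_headers(text: str) -> str:
--     """Add newlines to headers."""
--     lines = text.split("\n")
--     new_lines = []
--     for i in range(len(lines)):
--         if lines[i].startswith("#"):
--             line = f"\n{lines[i]}\n"
--             new_lines.append(line)
--         else:
--             new_lines.append(lines[i])
--     return "\n".join(new_lines)
-- ===== SOURCE B (Python) =====
-- def _add_newlines_to_headers(text: str) -> str:
--     """Add newlines to headers (single character-level pass, no split/join)."""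
--     out = []
--     line_start = True
--     in_header = False
--     for ch in text:
--         if ch == "\n":
--             if in_header:
--                 out.append("\n")
--             out.append("\n")
--             line_start = True
--             in_header = False
--         elif line_start and ch == "#":
--             out.append("\n")
--             out.append(ch)
--             line_start = False
--             in_header = True
--         else:
--             out.append(ch)
--             line_start = False
--     if in_header:
--         out.append("\n")
--     return "".join(out)
-- ===== Notes on version B (the rewrite author's own statement) =====
-- stated objective: alternative
-- what changed: Replaced A's split-into-lines / index-loop / wrap / join pipeline with a single character-level state-machine pass that tracks line starts and header lines and emits the surrounding newlines in place.
import Mathlib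
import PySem

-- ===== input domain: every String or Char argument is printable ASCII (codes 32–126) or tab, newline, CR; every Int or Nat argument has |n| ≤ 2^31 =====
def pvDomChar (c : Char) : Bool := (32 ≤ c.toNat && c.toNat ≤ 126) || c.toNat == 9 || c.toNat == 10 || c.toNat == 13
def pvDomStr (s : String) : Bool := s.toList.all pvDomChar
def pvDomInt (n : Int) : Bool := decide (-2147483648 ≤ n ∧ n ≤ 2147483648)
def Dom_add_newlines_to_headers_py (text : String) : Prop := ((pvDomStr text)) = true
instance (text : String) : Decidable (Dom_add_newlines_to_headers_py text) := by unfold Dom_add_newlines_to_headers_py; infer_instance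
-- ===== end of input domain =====

-- B replaces A's split/index-loop/join with a single character-level pass (state machine); objective: alternative.


-- ===== PORT A =====
def add_newlines_to_headers_py (text : String) : String :=
  let lines := PySem.Chars.splitOn text.toList ['\n']
  let newLines := (PySem.List.pyRange 0 (PySem.List.len lines) 1).foldl
    (fun acc i =>
      let li := PySem.List.pyGetD lines i []
      if PySem.Chars.startswith li ['#'] then acc ++ [('\n' :: li) ++ ['\n']]
      else acc ++ [li]) []
  String.mk (PySem.Chars.join ['\n'] newLines)

-- ===== PORT B =====
-- state machine: lineStart = at start of a line, inHeader = inside a line that began with '#'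
def addNlGo : List Char → Bool → Bool → List Char → List Char
  | [], _, inHeader, out => if inHeader then out ++ ['\n'] else out
  | c :: rest, lineStart, inHeader, out =>
    if c = '\n' then
      addNlGo rest true false (if inHeader then out ++ ['\n', '\n'] else out ++ ['\n'])
    else if lineStart && c = '#' then
      addNlGo rest false true (out ++ ['\n', c])
    else
      addNlGo rest false inHeader (out ++ [c])

def add_newlines_to_headers_py_alt (text : String) : String :=
  String.mk (addNlGo text.toList true false [])

-- ===== PRECONDITION & SPEC =====
def Spec_add_newlines_to_headers_py (text : String) (out : String) : Prop := out = add_newlines_to_headers_py_alt text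
instance (text : String) (out : String) : Decidable (Spec_add_newlines_to_headers_py text out) := by unfold Spec_add_newlines_to_headers_py; infer_instance

-- ===== CLAIM (what is proved, stated in full; the proofs are below) =====
def Claim_equal_add_newlines_to_headers_py : Prop := ∀ (text : String), Dom_add_newlines_to_headers_py text → Spec_add_newlines_to_headers_py text (add_newlines_to_headers_py text)

-- ===== LEMMAS AND PROOFS =====

-- split on '\n', as (first line, remaining lines)
def spNl : List Char → List Char × List (List Char)
  | [] => ([], [])
  | c :: cs =>
    let p := spNl cs
    if c = '\n' then ([], p.1 :: p.2) else (c :: p.1, p.2)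

-- A's per-line rewrite
def wrapNl (l : List Char) : List Char :=
  if PySem.Chars.startswith l ['#'] then ('\n' :: l) ++ ['\n'] else l

lemma splitOn_go_nl (l : List Char) : ∀ (fuel : Nat) (cur : List Char) (acc : List (List Char)),
    l.length ≤ fuel →
    PySem.Chars.splitOn.go ['\n'] fuel l cur acc =
      acc.reverse ++ ((cur.reverse ++ (spNl l).1) :: (spNl l).2) := by
  induction l with
  | nil =>
      intro fuel cur acc _
      cases fuel <;> simp [PySem.Chars.splitOn.go, spNl]
  | cons c rest ih =>
      intro fuel cur acc h
      cases fuel with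
      | zero => simp at h
      | succ n =>
        by_cases hc : c = '\n'
        · subst hc
          have hp : List.isPrefixOf ['\n'] ('\n' :: rest) = true := by
            simp [List.isPrefixOf]
          simp only [PySem.Chars.splitOn.go, hp, if_pos]
          have hd : List.drop ['\n'].length ('\n' :: rest) = rest := rfl
          rw [hd, ih n [] (cur.reverse :: acc) (by simpa using h)]
          simp [spNl]
        · have hp : List.isPrefixOf ['\n'] (c :: rest) = false := by
            simp only [List.isPrefixOf, Bool.and_eq_false_imp, beq_eq_false_iff_ne, ne_eq]
            simp [List.isPrefixOf]
            exact fun hardly => absurd hardly.symm hc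
          simp only [PySem.Chars.splitOn.go, hp]
          rw [if_neg (by simp [hp])]
          rw [ih n (c :: cur) acc (by simpa using h)]
          simp [spNl, hc]

lemma splitOn_nl (s : List Char) :
    PySem.Chars.splitOn s ['\n'] = (spNl s).1 :: (spNl s).2 := by
  unfold PySem.Chars.splitOn
  rw [splitOn_go_nl s (s.length + 1) [] [] (by omega)]
  simp

-- '\n'.join of a nonempty list of lines
lemma join_nl_cons (l : List Char) (t : List (List Char)) :
    PySem.Chars.join ['\n'] (l :: t) = l ++ t.flatMap (fun x => '\n' :: x) := by
  induction t generalizing l with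
  | nil => simp [PySem.Chars.join_singleton]
  | cons m t ih => rw [PySem.Chars.join_cons_cons, ih]; simp

-- the state machine, related to line splitting
lemma addNlGo_inv (cs : List Char) : ∀ (out : List Char),
    addNlGo cs true false out = out ++ wrapNl (spNl cs).1 ++ ((spNl cs).2.flatMap (fun x => '\n' :: wrapNl x))
  ∧ addNlGo cs false false out = out ++ (spNl cs).1 ++ ((spNl cs).2.flatMap (fun x => '\n' :: wrapNl x))
  ∧ addNlGo cs false true out = out ++ (spNl cs).1 ++ ['\n'] ++ ((spNl cs).2.flatMap (fun x => '\n' :: wrapNl x)) := by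
  induction cs with
  | nil =>
      intro out
      have hs : PySem.Chars.startswith ([] : List Char) ['#'] = false := rfl
      simp [addNlGo, spNl, wrapNl, hs]
  | cons c rest ih =>
      intro out
      by_cases hc : c = '\n'
      · subst hc
        have h1 : ∀ (ls inH : Bool), addNlGo ('\n' :: rest) ls inH out
            = addNlGo rest true false (if inH then out ++ ['\n', '\n'] else out ++ ['\n']) := by
          intro ls inH; simp [addNlGo]
        refine ⟨?_, ?_, ?_⟩ <;>
          · rw [h1, (ih _).1]
            simp [spNl, wrapNl, PySem.Chars.startswith, List.isPrefixOf]
      · by_cases hh : c = '#'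
        · subst hh
          have h1 : addNlGo ('#' :: rest) true false out = addNlGo rest false true (out ++ ['\n', '#']) := by
            simp [addNlGo]
          have h2 : ∀ inH, addNlGo ('#' :: rest) false inH out = addNlGo rest false inH (out ++ ['#']) := by
            intro inH; simp [addNlGo]
          have hw : wrapNl ('#' :: (spNl rest).1) = ('\n' :: '#' :: (spNl rest).1) ++ ['\n'] := by
            simp [wrapNl, PySem.Chars.startswith, List.isPrefixOf]
          rw [h1, h2, h2, (ih _).2.2, (ih _).2.1, (ih _).2.2]
          simp [spNl, hw]
        · have h1 : ∀ ls inH, addNlGo (c :: rest) ls inH out = addNlGo rest false inH (out ++ [c]) := by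
            intro ls inH
            simp [addNlGo, hc, hh]
          have hw : wrapNl (c :: (spNl rest).1) = c :: (spNl rest).1 := by
            simp [wrapNl, PySem.Chars.startswith, List.isPrefixOf, hh]
            exact fun h => absurd h.symm hh
          rw [h1, h1, h1, (ih _).2.1, (ih _).2.2]
          simp [spNl, hc, hw]

-- ===== VERDICT (by name: the statement is the Claim_ definition above) =====
theorem add_newlines_to_headers_py_spec : Claim_equal_add_newlines_to_headers_py := by
  intro text _
  unfold Spec_add_newlines_to_headers_py
  simp only [add_newlines_to_headers_py, add_newlines_to_headers_py_alt]
  rw [splitOn_nl, (addNlGo_inv text.toList []).1]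
  have key : ∀ (h : List Char) (t : List (List Char)),
      (PySem.List.pyRange 0 (PySem.List.len (h :: t)) 1).foldl
        (fun acc i =>
          if PySem.Chars.startswith (PySem.List.pyGetD (h :: t) i []) ['#']
          then acc ++ [('\n' :: PySem.List.pyGetD (h :: t) i []) ++ ['\n']]
          else acc ++ [PySem.List.pyGetD (h :: t) i []]) []
      = (h :: t).map wrapNl := by
    intro h t
    have hb : (fun (acc : List (List Char)) (i : Int) =>
          if PySem.Chars.startswith (PySem.List.pyGetD (h :: t) i []) ['#']
          then acc ++ [('\n' :: PySem.List.pyGetD (h :: t) i []) ++ ['\n']]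
          else acc ++ [PySem.List.pyGetD (h :: t) i []])
        = fun acc i => acc ++ [wrapNl (PySem.List.pyGetD (h :: t) i [])] := by
      funext acc i; unfold wrapNl; split_ifs <;> rfl
    rw [hb, PySem.List.foldl_pyRange_zero_pyGetD (h :: t) [] (fun acc li => acc ++ [wrapNl li]) [],
        PySem.List.foldl_append_singleton_eq_map]
    simp
  rw [key, List.map_cons, join_nl_cons]
  simp [List.flatMap_map, Function.comp]
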